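-- pv_equiv track=rewrite | github.com/ch83baker/cards_eq_solver | subset_graph_classes/my_subset_graph_again.py | encode_seq_to_str
-- ===== SOURCE A (Python) =====
-- def encode_seq_to_str(short_list, items):
--     """Do both of the prior functions in one step.
--
--     Parameters:
--     -----------
--     short_list: Iterable
--        The set of items in the subset of choice.
--     items: Iterable
--        the iterable giving you the items.
--     """
--     num_terms = len(items)
--     output_list = [0 for j in range(num_terms)]
--     for j in short_list:
--         for pair in enumerate(items):
--             if pair[1] == j:
--                 output_list[pair[0]] = 1
--     return ''.join([str(j) for j in output_list])
-- ===== SOURCE B (Python) =====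
-- def encode_seq_to_str(short_list, items):
--     """Mark presence: one set build, one pass over items."""
--     wanted = set(short_list)
--     return ''.join('1' if x in wanted else '0' for x in items)
-- ===== Notes on version B (the rewrite author's own statement) =====
-- stated objective: faster
-- what changed: Replaces A's nested loops (for each short_list element a full scan of items writing into a zero-filled list) with one set built from short_list and a single pass over items emitting '1'/'0' characters directly.
import Mathlib
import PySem

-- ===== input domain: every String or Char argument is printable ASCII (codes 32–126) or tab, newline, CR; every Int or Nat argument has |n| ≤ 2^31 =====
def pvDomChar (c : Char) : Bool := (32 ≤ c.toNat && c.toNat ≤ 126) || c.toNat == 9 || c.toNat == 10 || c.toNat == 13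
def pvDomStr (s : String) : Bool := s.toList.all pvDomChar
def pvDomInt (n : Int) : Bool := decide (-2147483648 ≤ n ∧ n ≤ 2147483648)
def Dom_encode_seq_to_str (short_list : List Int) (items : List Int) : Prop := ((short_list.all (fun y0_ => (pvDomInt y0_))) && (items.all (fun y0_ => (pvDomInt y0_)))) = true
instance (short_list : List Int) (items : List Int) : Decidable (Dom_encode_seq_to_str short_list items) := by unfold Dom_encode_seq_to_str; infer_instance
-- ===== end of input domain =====

-- B replaces A's nested scans (each short_list element rescans all of items, writing 1s into a
-- zero list) with one set built from short_list and a single pass over items emitting '1'/'0'.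

-- ===== PORT A =====
def encode_seq_to_str (short_list : List Int) (items : List Int) : String :=
  let num_terms : Int := (items.length : Int)
  let output_list : List Int := (PySem.List.pyRange 0 num_terms 1).map (fun _ => (0 : Int))
  let output_list := short_list.foldl (fun acc j =>
    (PySem.List.enumerate items 0).foldl (fun acc2 pair =>
      if pair.2 == j then PySem.List.pySetD acc2 pair.1 1 else acc2) acc) output_list
  PySem.Str.join "" (output_list.map (fun j => PySem.Int.toStr j))

-- ===== PORT B =====
def encode_seq_to_str_alt (short_list : List Int) (items : List Int) : String :=
  let wanted : PySem.Set Int := PySem.Set.ofList short_list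
  PySem.Str.join "" (items.map (fun x => if PySem.Set.contains wanted x then "1" else "0"))

-- ===== PRECONDITION & SPEC =====
def Spec_encode_seq_to_str (short_list : List Int) (items : List Int) (out : String) : Prop := out = encode_seq_to_str_alt short_list items
instance (short_list : List Int) (items : List Int) (out : String) : Decidable (Spec_encode_seq_to_str short_list items out) := by unfold Spec_encode_seq_to_str; infer_instance

-- ===== CLAIM (what is proved, stated in full; the proofs are below) =====
def Claim_equal_encode_seq_to_str : Prop := ∀ (short_list : List Int) (items : List Int), Dom_encode_seq_to_str short_list items → Spec_encode_seq_to_str short_list items (encode_seq_to_str short_list items)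

-- ===== LEMMAS AND PROOFS =====

-- setting the element just past a prefix
lemma set_append_length {α : Type} (l1 l2 : List α) (v : α) :
    (l1 ++ l2).set l1.length v = l1 ++ l2.set 0 v := by
  induction l1 with
  | nil => rfl
  | cons y ys ih => simp [ih]

-- A's inner loop over enumerate(items): sets 1 at every position holding j
lemma inner_loop (j : Int) (xs : List Int) : ∀ (pre : List Int) (f : Int → Int),
    (PySem.List.enumerate xs (pre.length : Int)).foldl
      (fun acc2 pair => if pair.2 == j then PySem.List.pySetD acc2 pair.1 1 else acc2)
      (pre ++ xs.map f)
    = pre ++ xs.map (fun x => if x = j then 1 else f x) := by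
  induction xs with
  | nil => intro pre f; simp [PySem.List.enumerate_nil]
  | cons x xs ih =>
    intro pre f
    rw [PySem.List.enumerate_cons]
    simp only [List.foldl_cons, List.map_cons]
    by_cases hx : x = j
    · subst hx
      rw [if_pos (by simp)]
      have h1 : PySem.List.pySetD (pre ++ f x :: xs.map f) ((pre.length : Int)) 1
          = (pre ++ [(1:Int)]) ++ xs.map f := by
        rw [PySem.List.pySetD_natCast, set_append_length]
        simp
      rw [h1]
      have h2 := ih (pre ++ [(1:Int)]) f
      simp only [List.length_append, List.length_cons, List.length_nil] at h2
      push_cast at h2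
      rw [h2]
      simp
    · rw [if_neg (by simp [hx])]
      have h2 := ih (pre ++ [f x]) f
      simp only [List.length_append, List.length_cons, List.length_nil] at h2
      push_cast at h2
      rw [show pre ++ f x :: xs.map f = (pre ++ [f x]) ++ xs.map f by simp, h2]
      simp [hx]

-- A's outer loop: accumulated marking as a map over items
lemma outer_loop (items : List Int) : ∀ (sl : List Int) (f : Int → Int),
    sl.foldl (fun acc j =>
      (PySem.List.enumerate items 0).foldl
        (fun acc2 pair => if pair.2 == j then PySem.List.pySetD acc2 pair.1 1 else acc2) acc)
      (items.map f)
    = items.map (fun x => if x ∈ sl then 1 else f x) := by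
  intro sl
  induction sl with
  | nil => intro f; simp
  | cons j js ih =>
    intro f
    simp only [List.foldl_cons]
    have h := inner_loop j items [] f
    simp only [List.length_nil, Nat.cast_zero, List.nil_append] at h
    rw [h, ih]
    apply List.map_congr_left
    intro x _
    by_cases hj : x = j <;> by_cases hm : x ∈ js <;> simp [hj, hm, List.mem_cons]

-- ===== VERDICT (by name: the statement is the Claim_ definition above) =====
theorem encode_seq_to_str_spec : Claim_equal_encode_seq_to_str := by
  intro sl items _
  unfold Spec_encode_seq_to_str encode_seq_to_str encode_seq_to_str_alt
  simp only []
  have hinit : (PySem.List.pyRange 0 (items.length : Int) 1).map (fun _ => (0 : Int))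
      = items.map (fun _ => (0 : Int)) := by
    rw [List.map_const', List.map_const', PySem.List.length_pyRange_one]
    simp
  rw [hinit, outer_loop items sl (fun _ => 0), List.map_map]
  congr 1
  apply List.map_congr_left
  intro x _
  simp only [Function.comp_apply, PySem.Set.contains_eq_listContains, List.contains_eq_mem,
    PySem.Set.mem_ofList]
  by_cases hm : x ∈ sl <;> simp [hm] <;> decide
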